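-- pv_equiv track=rewrite | github.com/prashanthr11/Leetcode | Biweekly Contest 45 /Minimum Length of String After Deleting Similar Ends.py | minimumLength
-- ===== SOURCE A (Python) =====
-- def minimumLength(s: str) -> int:
--
--     # Time: O(N)
--     # Space: O(1)
--
--     while len(s):
--         if len(s) > 1 and s[0] == s[-1]:
--             i = 1
--             tmp = s[0]
--             while i < len(s) and tmp == s[i]:
--                 i += 1
--             if i == len(s):
--                 return 0
--             j = len(s) - 1
--             while j > i and s[j] == tmp:
--                 j -= 1
--             s = s[i:j + 1]
--         else:
--             break
--
--     return len(s)
-- ===== SOURCE B (Python) =====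
-- def minimumLength(s: str) -> int:
--     # Two pointers shrinking from both ends in place; no slicing, O(N) with no copies.
--     l, r = 0, len(s) - 1
--     while l < r and s[l] == s[r]:
--         c = s[l]
--         while l <= r and s[l] == c:
--             l += 1
--         while l <= r and s[r] == c:
--             r -= 1
--     return r - l + 1
-- ===== Notes on version B (the rewrite author's own statement) =====
-- stated objective: faster
-- what changed: Replaces the loop that repeatedly slices the string (s = s[i:j+1], each slice copies) with two index pointers shrinking from both ends over the original string, so no copies are ever made.
import Mathlib
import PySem

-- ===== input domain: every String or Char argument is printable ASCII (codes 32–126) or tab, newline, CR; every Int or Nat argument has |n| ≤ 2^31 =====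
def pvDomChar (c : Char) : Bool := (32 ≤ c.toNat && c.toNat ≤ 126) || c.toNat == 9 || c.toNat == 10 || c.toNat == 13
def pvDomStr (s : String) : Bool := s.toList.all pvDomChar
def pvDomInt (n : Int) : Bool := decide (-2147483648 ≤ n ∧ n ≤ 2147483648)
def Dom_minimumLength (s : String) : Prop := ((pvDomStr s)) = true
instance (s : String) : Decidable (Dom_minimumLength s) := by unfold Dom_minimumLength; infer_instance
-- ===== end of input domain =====

-- B replaces A's repeated slicing (each outer round copies s = s[i:j+1]) by two index
-- pointers shrinking from both ends of the original string: objective = faster (no copies).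
-- Loops are ported as structural recursion on an explicit fuel that provably never runs out.

-- ===== PORT A =====
-- inner 'while i < len(s) and tmp == s[i]: i += 1'
def aIF : Nat → List Char → Char → Nat → Nat
  | 0, _, _, i => i
  | f + 1, w, tmp, i =>
    if i < w.length ∧ some tmp = PySem.List.pyGet? w (i : Int) then aIF f w tmp (i + 1) else i

def aI (w : List Char) (tmp : Char) (i : Nat) : Nat := aIF (w.length + 1) w tmp i

-- inner 'while j > i and s[j] == tmp: j -= 1'
def aJF : Nat → List Char → Char → Nat → Nat → Nat
  | 0, _, _, _, j => j
  | f + 1, w, tmp, i, j =>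
    if i < j ∧ PySem.List.pyGet? w (j : Int) = some tmp then aJF f w tmp i (j - 1) else j

def aJ (w : List Char) (tmp : Char) (i j : Nat) : Nat := aJF (j + 1) w tmp i j

-- outer 'while len(s): …' of A; 's = s[i:j+1]' is the only state update
def aLoopF : Nat → List Char → Int
  | 0, w => (w.length : Int)
  | f + 1, w =>
    if 0 < w.length then
      if 1 < w.length ∧ PySem.List.pyGet? w 0 = PySem.List.pyGet? w (-1) then
        match PySem.List.pyGet? w 0 with
        | some tmp =>
          if aI w tmp 1 = w.length then 0
          else
            aLoopF f (PySem.List.slice w (some ((aI w tmp 1 : Nat) : Int))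
                     (some (((aJ w tmp (aI w tmp 1) (w.length - 1) : Nat) : Int) + 1)))
        | none => 0   -- unreachable: w ≠ [], so s[0] exists
      else (w.length : Int)
    else (w.length : Int)

def aLoop (w : List Char) : Int := aLoopF (w.length + 1) w

def minimumLength (s : String) : Int := aLoop s.toList

-- ===== PORT B =====
-- inner 'while l <= r and s[l] == c: l += 1'
def bAdvF : Nat → List Char → Char → Int → Int → Int
  | 0, _, _, l, _ => l
  | f + 1, s, c, l, r =>
    if l ≤ r ∧ PySem.List.pyGet? s l = some c then bAdvF f s c (l + 1) r else l

def bAdv (s : List Char) (c : Char) (l r : Int) : Int := bAdvF ((r + 1 - l).toNat + 1) s c l r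

-- inner 'while l <= r and s[r] == c: r -= 1'
def bRetF : Nat → List Char → Char → Int → Int → Int
  | 0, _, _, _, r => r
  | f + 1, s, c, l, r =>
    if l ≤ r ∧ PySem.List.pyGet? s r = some c then bRetF f s c l (r - 1) else r

def bRet (s : List Char) (c : Char) (l r : Int) : Int := bRetF ((r + 1 - l).toNat + 1) s c l r

-- outer 'while l < r and s[l] == s[r]: …' of B
def bLoopF : Nat → List Char → Int → Int → Int
  | 0, _, l, r => r - l + 1
  | f + 1, s, l, r =>
    if l < r ∧ PySem.List.pyGet? s l = PySem.List.pyGet? s r then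
      match PySem.List.pyGet? s l with
      | some c => bLoopF f s (bAdv s c l r) (bRet s c (bAdv s c l r) r)
      | none => r - l + 1   -- unreachable: 0 ≤ l < r < len s at every call
    else r - l + 1

def bLoop (s : List Char) (l r : Int) : Int := bLoopF ((r + 1 - l).toNat + 1) s l r

def minimumLength_alt (s : String) : Int :=
  bLoop s.toList 0 (PySem.Str.len s - 1)

-- ===== PRECONDITION & SPEC =====
def Spec_minimumLength (s : String) (out : Int) : Prop := out = minimumLength_alt s
instance (s : String) (out : Int) : Decidable (Spec_minimumLength s out) := by unfold Spec_minimumLength; infer_instance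

-- ===== CLAIM (what is proved, stated in full; the proofs are below) =====
def Claim_equal_minimumLength : Prop := ∀ (s : String), Dom_minimumLength s → Spec_minimumLength s (minimumLength s)

-- ===== LEMMAS AND PROOFS =====

-- fuel is irrelevant once sufficient: one-step unfolding equations for the four loops
theorem aIF_succ (w : List Char) (tmp : Char) : ∀ (f i : Nat), w.length ≤ i + f →
    aIF (f + 1) w tmp i = aIF f w tmp i := by
  intro f
  induction f with
  | zero => intro i h; simp only [aIF]; rw [if_neg (by rintro ⟨h1, -⟩; omega)]
  | succ f ih =>
    intro i h
    show (if _ then aIF (f + 1) w tmp (i + 1) else i) = (if _ then aIF f w tmp (i + 1) else i)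
    by_cases hg : i < w.length ∧ some tmp = PySem.List.pyGet? w (i : Int)
    · rw [if_pos hg, if_pos hg, ih (i + 1) (by omega)]
    · rw [if_neg hg, if_neg hg]

theorem aI_eq (w : List Char) (tmp : Char) (i : Nat) :
    aI w tmp i = if i < w.length ∧ some tmp = PySem.List.pyGet? w (i : Int)
      then aI w tmp (i + 1) else i := by
  show aIF (w.length + 1) w tmp i = _
  unfold aI
  rw [show aIF (w.length + 1) w tmp (i + 1) = aIF w.length w tmp (i + 1) from
    aIF_succ w tmp w.length (i + 1) (by omega)]
  rfl

theorem aJ_eq (w : List Char) (tmp : Char) (i j : Nat) :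
    aJ w tmp i j = if i < j ∧ PySem.List.pyGet? w (j : Int) = some tmp
      then aJ w tmp i (j - 1) else j := by
  show aJF (j + 1) w tmp i j = _
  by_cases hg : i < j ∧ PySem.List.pyGet? w (j : Int) = some tmp
  · have hj : j = (j - 1) + 1 := by omega
    unfold aJ
    rw [if_pos hg, ← hj]
    show (if _ then aJF j w tmp i (j - 1) else j) = _
    rw [if_pos hg, hj]
  · show (if _ then aJF j w tmp i (j - 1) else j) = _
    rw [if_neg hg, if_neg hg]

theorem bAdv_eq (s : List Char) (c : Char) (l r : Int) :
    bAdv s c l r = if l ≤ r ∧ PySem.List.pyGet? s l = some c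
      then bAdv s c (l + 1) r else l := by
  show bAdvF ((r + 1 - l).toNat + 1) s c l r = _
  by_cases hg : l ≤ r ∧ PySem.List.pyGet? s l = some c
  · have hf : (r + 1 - l).toNat = (r + 1 - (l + 1)).toNat + 1 := by omega
    rw [hf]
    show (if _ then bAdvF ((r + 1 - (l + 1)).toNat + 1) s c (l + 1) r else l) = _
    rw [if_pos hg, if_pos hg]
    rfl
  · show (if _ then bAdvF (r + 1 - l).toNat s c (l + 1) r else l) = _
    rw [if_neg hg, if_neg hg]

theorem bRet_eq (s : List Char) (c : Char) (l r : Int) :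
    bRet s c l r = if l ≤ r ∧ PySem.List.pyGet? s r = some c
      then bRet s c l (r - 1) else r := by
  show bRetF ((r + 1 - l).toNat + 1) s c l r = _
  by_cases hg : l ≤ r ∧ PySem.List.pyGet? s r = some c
  · have hf : (r + 1 - l).toNat = ((r - 1) + 1 - l).toNat + 1 := by omega
    rw [hf]
    show (if _ then bRetF (((r - 1) + 1 - l).toNat + 1) s c l (r - 1) else r) = _
    rw [if_pos hg, if_pos hg]
    rfl
  · show (if _ then bRetF (r + 1 - l).toNat s c l (r - 1) else r) = _
    rw [if_neg hg, if_neg hg]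

theorem aI_ge (w : List Char) (tmp : Char) (i : Nat) : i ≤ aI w tmp i := by
  suffices h : ∀ f i, i ≤ aIF f w tmp i from h _ i
  intro f
  induction f with
  | zero => intro i; exact le_rfl
  | succ f ih =>
    intro i
    show i ≤ if _ then aIF f w tmp (i + 1) else i
    split
    · exact le_trans (by omega) (ih (i + 1))
    · exact le_rfl

theorem aI_le (w : List Char) (tmp : Char) (i : Nat) (h : i ≤ w.length) :
    aI w tmp i ≤ w.length := by
  suffices hs : ∀ f i, i ≤ w.length → aIF f w tmp i ≤ w.length from hs _ i h
  intro f
  induction f with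
  | zero => intro i hi; exact hi
  | succ f ih =>
    intro i hi
    show (if _ then aIF f w tmp (i + 1) else i) ≤ w.length
    split
    · next hg => exact ih (i + 1) (by omega)
    · exact hi

theorem aI_stop (w : List Char) (tmp : Char) (i : Nat) :
    ¬ (aI w tmp i < w.length ∧ some tmp = PySem.List.pyGet? w ((aI w tmp i : Nat) : Int)) := by
  suffices hs : ∀ f i, w.length ≤ i + f →
      ¬ (aIF f w tmp i < w.length ∧ some tmp = PySem.List.pyGet? w ((aIF f w tmp i : Nat) : Int)) by
    exact hs _ i (by omega)
  intro f
  induction f with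
  | zero => intro i h; rintro ⟨h1, -⟩; exact absurd h1 (by simp [aIF]; omega)
  | succ f ih =>
    intro i h
    show ¬ ((if _ then aIF f w tmp (i + 1) else i) < w.length ∧
      some tmp = PySem.List.pyGet? w (((if _ then aIF f w tmp (i + 1) else i) : Nat) : Int))
    split
    · exact ih (i + 1) (by omega)
    · next hg => exact hg

theorem aJ_ge (w : List Char) (tmp : Char) (i j : Nat) (h : i ≤ j) : i ≤ aJ w tmp i j := by
  suffices hs : ∀ f j, i ≤ j → i ≤ aJF f w tmp i j from hs _ j h
  intro f
  induction f with
  | zero => intro j hj; exact hj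
  | succ f ih =>
    intro j hj
    show i ≤ if _ then aJF f w tmp i (j - 1) else j
    split
    · next hg => exact ih (j - 1) (by omega)
    · exact hj

theorem aJ_le (w : List Char) (tmp : Char) (i j : Nat) : aJ w tmp i j ≤ j := by
  suffices hs : ∀ f j, aJF f w tmp i j ≤ j from hs _ j
  intro f
  induction f with
  | zero => intro j; exact le_rfl
  | succ f ih =>
    intro j
    show (if _ then aJF f w tmp i (j - 1) else j) ≤ j
    split
    · exact le_trans (ih (j - 1)) (by omega)
    · exact le_rfl

theorem bAdv_ge (s : List Char) (c : Char) (l r : Int) : l ≤ bAdv s c l r := by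
  suffices hs : ∀ f l, l ≤ bAdvF f s c l r from hs _ l
  intro f
  induction f with
  | zero => intro l; exact le_rfl
  | succ f ih =>
    intro l
    show l ≤ if _ then bAdvF f s c (l + 1) r else l
    split
    · exact le_trans (by omega) (ih (l + 1))
    · exact le_rfl

theorem bRet_le (s : List Char) (c : Char) (l r : Int) : bRet s c l r ≤ r := by
  suffices hs : ∀ f r, bRetF f s c l r ≤ r from hs _ r
  intro f
  induction f with
  | zero => intro r; exact le_rfl
  | succ f ih =>
    intro r
    show (if _ then bRetF f s c l (r - 1) else r) ≤ r
    split
    · exact le_trans (ih (r - 1)) (by omega)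
    · exact le_rfl

-- sufficient fuel never changes the outer loops either
theorem aLoopF_succ : ∀ (f : Nat) (w : List Char), w.length ≤ f →
    aLoopF (f + 1) w = aLoopF f w := by
  intro f
  induction f with
  | zero =>
    intro w h
    have hw : w = [] := List.length_eq_zero_iff.mp (by omega)
    subst hw
    simp [aLoopF]
  | succ f ih =>
    intro w h
    show (if 0 < w.length then _ else _) = (if 0 < w.length then _ else _)
    by_cases h0 : 0 < w.length
    · rw [if_pos h0, if_pos h0]
      by_cases hc : 1 < w.length ∧ PySem.List.pyGet? w 0 = PySem.List.pyGet? w (-1)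
      · rw [if_pos hc, if_pos hc]
        cases hm : PySem.List.pyGet? w 0 with
        | none => rfl
        | some tmp =>
          dsimp only
          by_cases hi : aI w tmp 1 = w.length
          · rw [if_pos hi, if_pos hi]
          · rw [if_neg hi, if_neg hi]
            apply ih
            have h1 : 1 ≤ aI w tmp 1 := aI_ge w tmp 1
            rw [show (((aJ w tmp (aI w tmp 1) (w.length - 1) : Nat) : Int) + 1)
                  = (((aJ w tmp (aI w tmp 1) (w.length - 1) + 1 : Nat) : Int)) by push_cast; ring]
            rw [PySem.List.length_slice, PySem.List.clampIdx_natCast, PySem.List.clampIdx_natCast]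
            omega
      · rw [if_neg hc, if_neg hc]
    · rw [if_neg h0, if_neg h0]

theorem aLoopF_stable : ∀ (f : Nat) (w : List Char), w.length < f →
    aLoopF f w = aLoopF (w.length + 1) w := by
  intro f
  induction f with
  | zero => intro w h; omega
  | succ f ih =>
    intro w h
    rcases Nat.lt_or_ge w.length f with h' | h'
    · rw [aLoopF_succ f w (by omega), ih w h']
    · have : w.length = f := by omega
      rw [this]

theorem aLoop_eq (w : List Char) :
    aLoop w =
      if 0 < w.length then
        if 1 < w.length ∧ PySem.List.pyGet? w 0 = PySem.List.pyGet? w (-1) then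
          match PySem.List.pyGet? w 0 with
          | some tmp =>
            if aI w tmp 1 = w.length then 0
            else
              aLoop (PySem.List.slice w (some ((aI w tmp 1 : Nat) : Int))
                       (some (((aJ w tmp (aI w tmp 1) (w.length - 1) : Nat) : Int) + 1)))
          | none => 0
        else (w.length : Int)
      else (w.length : Int) := by
  show aLoopF (w.length + 1) w = _
  unfold aLoop
  show (if 0 < w.length then _ else _) = _
  by_cases h0 : 0 < w.length
  · rw [if_pos h0, if_pos h0]
    by_cases hc : 1 < w.length ∧ PySem.List.pyGet? w 0 = PySem.List.pyGet? w (-1)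
    · rw [if_pos hc, if_pos hc]
      cases hm : PySem.List.pyGet? w 0 with
      | none => rfl
      | some tmp =>
        dsimp only
        by_cases hi : aI w tmp 1 = w.length
        · rw [if_pos hi, if_pos hi]
        · rw [if_neg hi, if_neg hi]
          apply aLoopF_stable
          have h1 : 1 ≤ aI w tmp 1 := aI_ge w tmp 1
          rw [show (((aJ w tmp (aI w tmp 1) (w.length - 1) : Nat) : Int) + 1)
                = (((aJ w tmp (aI w tmp 1) (w.length - 1) + 1 : Nat) : Int)) by push_cast; ring]
          rw [PySem.List.length_slice, PySem.List.clampIdx_natCast, PySem.List.clampIdx_natCast]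
          omega
    · rw [if_neg hc, if_neg hc]
  · rw [if_neg h0, if_neg h0]

theorem bLoopF_succ : ∀ (f : Nat) (s : List Char) (l r : Int), (r + 1 - l).toNat ≤ f →
    bLoopF (f + 1) s l r = bLoopF f s l r := by
  intro f
  induction f with
  | zero =>
    intro s l r h
    show (if _ then _ else _) = r - l + 1
    rw [if_neg (by rintro ⟨h1, -⟩; omega)]
  | succ f ih =>
    intro s l r h
    show (if _ then _ else _) = (if _ then _ else _)
    by_cases hg : l < r ∧ PySem.List.pyGet? s l = PySem.List.pyGet? s r
    · rw [if_pos hg, if_pos hg]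
      cases hm : PySem.List.pyGet? s l with
      | none => rfl
      | some c =>
        apply ih
        have h1 : l + 1 ≤ bAdv s c l r := by
          rw [bAdv_eq, if_pos ⟨hg.1.le, hm⟩]
          exact bAdv_ge s c (l + 1) r
        have h2 : bRet s c (bAdv s c l r) r ≤ r := bRet_le s c _ r
        omega
    · rw [if_neg hg, if_neg hg]

theorem bLoopF_stable : ∀ (f : Nat) (s : List Char) (l r : Int), (r + 1 - l).toNat < f →
    bLoopF f s l r = bLoopF ((r + 1 - l).toNat + 1) s l r := by
  intro f
  induction f with
  | zero => intro s l r h; omega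
  | succ f ih =>
    intro s l r h
    rcases Nat.lt_or_ge (r + 1 - l).toNat f with h' | h'
    · rw [bLoopF_succ f s l r (by omega), ih s l r h']
    · have : (r + 1 - l).toNat = f := by omega
      rw [this]

theorem bLoop_eq (s : List Char) (l r : Int) :
    bLoop s l r =
      if l < r ∧ PySem.List.pyGet? s l = PySem.List.pyGet? s r then
        match PySem.List.pyGet? s l with
        | some c => bLoop s (bAdv s c l r) (bRet s c (bAdv s c l r) r)
        | none => r - l + 1
      else r - l + 1 := by
  show bLoopF ((r + 1 - l).toNat + 1) s l r = _
  unfold bLoop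
  show (if _ then _ else _) = _
  by_cases hg : l < r ∧ PySem.List.pyGet? s l = PySem.List.pyGet? s r
  · rw [if_pos hg, if_pos hg]
    cases hm : PySem.List.pyGet? s l with
    | none => rfl
    | some c =>
      apply bLoopF_stable
      have h1 : l + 1 ≤ bAdv s c l r := by
        rw [bAdv_eq, if_pos ⟨hg.1.le, hm⟩]
        exact bAdv_ge s c (l + 1) r
      have h2 : bRet s c (bAdv s c l r) r ≤ r := bRet_le s c _ r
      omega
  · rw [if_neg hg, if_neg hg]

-- the window s[l..r] (inclusive) that B's two pointers describe
def win (s : List Char) (l r : Int) : List Char :=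
  (s.drop l.toNat).take (r + 1 - l).toNat

theorem win_length (s : List Char) (l r : Int) (hl : 0 ≤ l) (hr : r < s.length) :
    (win s l r).length = (r + 1 - l).toNat := by
  simp [win]; omega

theorem win_get (s : List Char) (l m r : Int) (hl : 0 ≤ l) (hlm : l ≤ m) (hmr : m ≤ r)
    (hr : r < s.length) :
    PySem.List.pyGet? (win s l r) (m - l) = PySem.List.pyGet? s m := by
  rw [PySem.List.pyGet?_of_nonneg (win s l r) (show (0:Int) ≤ m - l by omega),
      PySem.List.pyGet?_of_nonneg s (show (0:Int) ≤ m by omega)]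
  unfold win
  rw [List.getElem?_take_of_lt (by omega), List.getElem?_drop]
  congr 1
  omega

-- B's first inner loop over s is A's first inner loop over the window
theorem bAdv_eq_aI (s : List Char) (c : Char) (l r : Int) (hl : 0 ≤ l) (hr : r < s.length) :
    ∀ (n : Nat) (m : Int), (r + 1 - m).toNat ≤ n → l ≤ m → m ≤ r + 1 →
    bAdv s c m r = l + ((aI (win s l r) c (m - l).toNat : Nat) : Int) := by
  intro n
  induction n with
  | zero =>
    intro m hn hm hmr1
    rw [bAdv_eq, if_neg (by omega)]
    rw [aI_eq, if_neg (by rintro ⟨h1, -⟩; rw [win_length s l r hl hr] at h1; omega)]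
    omega
  | succ n ih =>
    intro m hn hm hmr1
    have hWlen := win_length s l r hl hr
    rw [bAdv_eq, aI_eq]
    by_cases hg : m ≤ r ∧ PySem.List.pyGet? s m = some c
    · have hget : PySem.List.pyGet? (win s l r) (((m - l).toNat : Nat) : Int)
          = PySem.List.pyGet? s m := by
        rw [show (((m - l).toNat : Nat) : Int) = m - l by omega]
        exact win_get s l m r hl hm hg.1 hr
      rw [if_pos hg, if_pos ⟨by omega, by rw [hget]; exact hg.2.symm⟩]
      rw [show (m - l).toNat + 1 = (m + 1 - l).toNat by omega]
      exact ih (m + 1) (by omega) (by omega) (by omega)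
    · rw [if_neg hg, if_neg ?_]
      · omega
      rintro ⟨h1, h2⟩
      have hmr' : m ≤ r := by omega
      have hget : PySem.List.pyGet? (win s l r) (((m - l).toNat : Nat) : Int)
          = PySem.List.pyGet? s m := by
        rw [show (((m - l).toNat : Nat) : Int) = m - l by omega]
        exact win_get s l m r hl hm hmr' hr
      exact hg ⟨hmr', by rw [← hget]; exact h2.symm⟩

-- B's second inner loop over s is A's second inner loop over the window (valid once s[l'] ≠ c)
theorem bRet_eq_aJ (s : List Char) (c : Char) (l l' r : Int) (hl : 0 ≤ l) (hll : l ≤ l')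
    (hr : r < s.length) (hne : PySem.List.pyGet? s l' ≠ some c) :
    ∀ (n : Nat) (r' : Int), (r' - l').toNat ≤ n → l' ≤ r' → r' ≤ r →
    bRet s c l' r' = l + ((aJ (win s l r) c (l' - l).toNat (r' - l).toNat : Nat) : Int) := by
  intro n
  induction n with
  | zero =>
    intro r' hn hlr hrr
    have h0 : r' = l' := by omega
    rw [bRet_eq, if_neg (by rintro ⟨-, h2⟩; exact hne (h0 ▸ h2))]
    rw [aJ_eq, if_neg (by rintro ⟨h1, -⟩; omega)]
    omega
  | succ n ih =>
    intro r' hn hlr hrr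
    have hget : PySem.List.pyGet? (win s l r) (((r' - l).toNat : Nat) : Int)
        = PySem.List.pyGet? s r' := by
      rw [show (((r' - l).toNat : Nat) : Int) = r' - l by omega]
      exact win_get s l r' r hl (by omega) hrr hr
    rw [bRet_eq, aJ_eq]
    by_cases hg : l' ≤ r' ∧ PySem.List.pyGet? s r' = some c
    · have hlt : l' < r' := by
        rcases eq_or_lt_of_le hlr with h | h
        · exact absurd (h ▸ hg.2) hne
        · exact h
      rw [if_pos hg, if_pos ⟨by omega, by rw [hget]; exact hg.2⟩]
      rw [show (r' - l).toNat - 1 = (r' - 1 - l).toNat by omega]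
      exact ih (r' - 1) (by omega) (by omega) (by omega)
    · rw [if_neg hg, if_neg ?_]
      · omega
      rintro ⟨h1, h2⟩
      exact hg ⟨by omega, by rw [← hget]; exact h2⟩

-- A's slice of the window is the window of B's new pointers
theorem win_slice (s : List Char) (l r : Int) (i j : Nat)
    (hl : 0 ≤ l) (hij : i ≤ j + 1) (hj : (j : Int) ≤ r - l) (hr : r < s.length) :
    PySem.List.slice (win s l r) (some ((i : Nat) : Int)) (some (((j : Nat) : Int) + 1))
      = win s (l + i) (l + j) := by
  rw [show (((j : Nat) : Int) + 1) = (((j + 1 : Nat) : Nat) : Int) by push_cast; ring]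
  rw [PySem.List.slice_natCast]
  unfold win
  rw [List.drop_take, List.drop_drop, List.take_take]
  rw [show l.toNat + i = (l + i).toNat by omega]
  rw [show ((l + j) + 1 - (l + i)).toNat = j + 1 - i by omega]
  congr 1
  omega

-- main invariant: B's two-pointer loop on s computes A's loop on the window s[l..r]
theorem main_inv (s : List Char) : ∀ (n : Nat) (l r : Int), (r + 1 - l).toNat ≤ n →
    0 ≤ l → l ≤ r + 1 → r < s.length → bLoop s l r = aLoop (win s l r) := by
  intro n
  induction n with
  | zero =>
    intro l r hn hl hlr1 hr
    rw [bLoop_eq, if_neg (by rintro ⟨h, -⟩; omega)]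
    rw [aLoop_eq, if_neg (by rw [win_length s l r hl hr]; omega)]
    rw [win_length s l r hl hr]
    omega
  | succ n ih =>
    intro l r hn hl hlr1 hr
    have hWlen := win_length s l r hl hr
    by_cases hlr : l < r
    case neg =>
      rw [bLoop_eq, if_neg (by rintro ⟨h, -⟩; omega)]
      rw [aLoop_eq]
      by_cases h0 : 0 < (win s l r).length
      · rw [if_pos h0, if_neg (by rintro ⟨h1, -⟩; omega)]
        omega
      · rw [if_neg h0]
        omega
    case pos =>
      have hget0 : PySem.List.pyGet? (win s l r) 0 = PySem.List.pyGet? s l := by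
        have h := win_get s l l r hl le_rfl (by omega) hr
        rw [show l - l = (0:Int) by ring] at h
        exact h
      have hgetr : PySem.List.pyGet? (win s l r) (r - l) = PySem.List.pyGet? s r :=
        win_get s l r r hl (by omega) le_rfl hr
      have hgetlast : PySem.List.pyGet? (win s l r) (-1) = PySem.List.pyGet? s r := by
        rw [PySem.List.pyGet?_neg_one, List.getLast?_eq_getElem?]
        rw [← hgetr, PySem.List.pyGet?_of_nonneg _ (by omega)]
        congr 1
        omega
      by_cases hEq : PySem.List.pyGet? s l = PySem.List.pyGet? s r
      case neg =>
        rw [bLoop_eq, if_neg (by rintro ⟨-, h⟩; exact hEq h)]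
        rw [aLoop_eq, if_pos (by omega),
            if_neg (by rintro ⟨-, h⟩; rw [hget0, hgetlast] at h; exact hEq h)]
        omega
      case pos =>
        obtain ⟨c, hc⟩ : ∃ c, PySem.List.pyGet? s l = some c := by
          rw [PySem.List.pyGet?_of_nonneg s (by omega)]
          exact ⟨_, List.getElem?_eq_getElem (by omega)⟩
        rw [bLoop_eq, if_pos ⟨hlr, hEq⟩]
        rw [aLoop_eq, if_pos (by omega), if_pos ⟨by omega, by rw [hget0, hgetlast]; exact hEq⟩]
        simp only [hget0, hc]
        have haI0 : aI (win s l r) c 0 = aI (win s l r) c 1 := by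
          rw [aI_eq, if_pos ⟨by omega, by rw [show (((0:Nat)) : Int) = (0:Int) by norm_num,
            hget0, hc]⟩]
        have hbadv : bAdv s c l r = l + ((aI (win s l r) c 1 : Nat) : Int) := by
          have h := bAdv_eq_aI s c l r hl hr ((r + 1 - l).toNat) l (by omega) le_rfl (by omega)
          rw [show (l - l).toNat = 0 by omega] at h
          rw [h, haI0]
        have hi1 : 1 ≤ aI (win s l r) c 1 := aI_ge _ _ _
        have hiLen : aI (win s l r) c 1 ≤ (win s l r).length := aI_le _ _ _ (by omega)
        by_cases hall : aI (win s l r) c 1 = (win s l r).length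
        · rw [if_pos hall]
          have hl' : bAdv s c l r = r + 1 := by rw [hbadv, hall]; omega
          rw [hl']
          rw [bRet_eq, if_neg (by rintro ⟨h, -⟩; omega)]
          rw [bLoop_eq, if_neg (by rintro ⟨h, -⟩; omega)]
          omega
        · rw [if_neg hall]
          have hilt : aI (win s l r) c 1 < (win s l r).length := lt_of_le_of_ne hiLen hall
          have hne : PySem.List.pyGet? s (l + ((aI (win s l r) c 1 : Nat) : Int)) ≠ some c := by
            have hstop := aI_stop (win s l r) c 1
            have h2' : ¬ some c = PySem.List.pyGet? (win s l r) ((aI (win s l r) c 1 : Nat) : Int) :=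
              fun h => hstop ⟨hilt, h⟩
            have hw := win_get s l (l + ((aI (win s l r) c 1 : Nat) : Int)) r hl (by omega)
              (by omega) hr
            rw [show l + ((aI (win s l r) c 1 : Nat) : Int) - l
                  = ((aI (win s l r) c 1 : Nat) : Int) by ring] at hw
            rw [← hw]
            exact fun h => h2' h.symm
          have hbret : bRet s c (l + ((aI (win s l r) c 1 : Nat) : Int)) r
              = l + ((aJ (win s l r) c (aI (win s l r) c 1)
                        ((win s l r).length - 1) : Nat) : Int) := by
            have h := bRet_eq_aJ s c l (l + ((aI (win s l r) c 1 : Nat) : Int)) r hl (by omega)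
              hr hne ((r - (l + ((aI (win s l r) c 1 : Nat) : Int))).toNat) r (by omega)
              (by omega) le_rfl
            rw [show (l + ((aI (win s l r) c 1 : Nat) : Int) - l).toNat
                  = aI (win s l r) c 1 by omega] at h
            rw [show (r - l).toNat = (win s l r).length - 1 by omega] at h
            exact h
          have hj1 : aI (win s l r) c 1 ≤ aJ (win s l r) c (aI (win s l r) c 1)
              ((win s l r).length - 1) := aJ_ge _ _ _ _ (by omega)
          have hj2 : aJ (win s l r) c (aI (win s l r) c 1) ((win s l r).length - 1)
              ≤ (win s l r).length - 1 := aJ_le _ _ _ _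
          rw [hbadv, hbret]
          rw [win_slice s l r (aI (win s l r) c 1)
                (aJ (win s l r) c (aI (win s l r) c 1) ((win s l r).length - 1))
                hl (by omega) (by omega) hr]
          exact ih (l + ((aI (win s l r) c 1 : Nat) : Int))
            (l + ((aJ (win s l r) c (aI (win s l r) c 1) ((win s l r).length - 1) : Nat) : Int))
            (by omega) (by omega) (by omega) (by omega)

-- ===== VERDICT (by name: the statement is the Claim_ definition above) =====
theorem minimumLength_spec : Claim_equal_minimumLength := by
  intro s _
  unfold Spec_minimumLength minimumLength minimumLength_alt
  rw [PySem.Str.len_eq]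
  rw [main_inv s.toList (s.toList.length) 0 ((s.toList.length : Int) - 1)
    (by omega) (by omega) (by omega) (by omega)]
  congr 1
  simp [win]
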